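-- pv_equiv track=rewrite | github.com/Stanvla/Thesis | hubert/asr_dataset.py | _merge_replacements
-- ===== SOURCE A (Python) =====
-- def _merge_replacements(replacements, patterns):
--     ordered_patterns = sorted(patterns, key=lambda x: x[1])
--     ordered_replacements = []
--     for p, _ in ordered_patterns:
--         for replacement in replacements:
--             for rep_key, rep_lst in replacement:
--                 if rep_key == p:
--                     ordered_replacements.append((rep_key, rep_lst))
--                     break
--     return ordered_replacements, ordered_patterns
-- ===== SOURCE B (Python) =====
-- def _merge_replacements(replacements, patterns):
--     # Build a grouping index once: key -> the first matching pair from each replacement, in replacement order.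
--     index = {}
--     for replacement in replacements:
--         firsts = {}
--         for rep_key, rep_lst in replacement:
--             firsts.setdefault(rep_key, (rep_key, rep_lst))
--         for key, pair in firsts.items():
--             index.setdefault(key, []).append(pair)
--     ordered_patterns = sorted(patterns, key=lambda x: x[1])
--     ordered_replacements = []
--     for p, _ in ordered_patterns:
--         ordered_replacements.extend(index.get(p, []))
--     return ordered_replacements, ordered_patterns
-- ===== Notes on version B (the rewrite author's own statement) =====
-- stated objective: faster
-- what changed: Replaces A's per-pattern rescan of every replacement (triple nested loop with break) by a single forward pass that builds a key->first-pairs grouping index, then one linear pass over the sorted patterns extending the output from index lookups.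
import Mathlib
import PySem

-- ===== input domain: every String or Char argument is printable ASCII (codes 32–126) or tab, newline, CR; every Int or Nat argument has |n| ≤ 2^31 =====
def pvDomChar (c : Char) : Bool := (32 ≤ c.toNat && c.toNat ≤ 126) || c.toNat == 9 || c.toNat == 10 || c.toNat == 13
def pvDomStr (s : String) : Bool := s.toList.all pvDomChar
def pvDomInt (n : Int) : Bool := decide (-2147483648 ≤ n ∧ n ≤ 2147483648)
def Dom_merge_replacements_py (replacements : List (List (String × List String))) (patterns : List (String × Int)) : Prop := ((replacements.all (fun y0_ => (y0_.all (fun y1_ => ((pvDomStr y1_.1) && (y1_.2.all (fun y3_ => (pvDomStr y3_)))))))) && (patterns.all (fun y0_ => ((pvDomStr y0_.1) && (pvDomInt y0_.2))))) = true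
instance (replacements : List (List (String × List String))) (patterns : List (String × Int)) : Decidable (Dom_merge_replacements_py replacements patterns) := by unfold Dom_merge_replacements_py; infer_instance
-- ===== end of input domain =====

-- B replaces A's per-pattern triple scan by a one-pass grouping index plus a single pass over the sorted patterns (faster mechanism pending timing run).

-- ===== PORT A =====
-- inner loop over one replacement: append the first pair whose key equals p, then break
def pvInnerA (p : String) : List (String × List String) → List (String × List String) → List (String × List String)
  | [], acc => acc
  | (k, l) :: rest, acc => if k == p then acc ++ [(k, l)] else pvInnerA p rest acc

def merge_replacements_py (replacements : List (List (String × List String))) (patterns : List (String × Int)) : (List (String × List String)) × (List (String × Int)) :=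
  let ordered_patterns := PySem.List.sorted patterns (fun x => x.2) false
  let ordered_replacements := ordered_patterns.foldl (fun acc pr =>
      replacements.foldl (fun acc replacement => pvInnerA pr.1 replacement acc) acc) []
  (ordered_replacements, ordered_patterns)

-- ===== PORT B =====
-- firsts: first pair seen for each distinct key of one replacement (dict.setdefault)
def pvFirstsB (replacement : List (String × List String)) : PySem.Dict String (String × List String) :=
  replacement.foldl (fun d x => d.setdefault x.1 x) PySem.Dict.empty

-- index: key -> list of its first pairs, one per replacement, in replacement order
def pvIndexB (replacements : List (List (String × List String))) : PySem.Dict String (List (String × List String)) :=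
  replacements.foldl (fun ix replacement =>
      (pvFirstsB replacement).items.foldl (fun ix x => ix.modify x.1 [] (· ++ [x.2])) ix)
    PySem.Dict.empty

def merge_replacements_py_alt (replacements : List (List (String × List String))) (patterns : List (String × Int)) : (List (String × List String)) × (List (String × Int)) :=
  let index := pvIndexB replacements
  let ordered_patterns := PySem.List.sorted patterns (fun x => x.2) false
  let ordered_replacements := ordered_patterns.foldl (fun acc pr => acc ++ index.getD pr.1 []) []
  (ordered_replacements, ordered_patterns)

-- ===== PRECONDITION & SPEC =====
def Spec_merge_replacements_py (replacements : List (List (String × List String))) (patterns : List (String × Int)) (out : (List (String × List String)) × (List (String × Int))) : Prop := out = merge_replacements_py_alt replacements patterns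
instance (replacements : List (List (String × List String))) (patterns : List (String × Int)) (out : (List (String × List String)) × (List (String × Int))) : Decidable (Spec_merge_replacements_py replacements patterns out) := by unfold Spec_merge_replacements_py; infer_instance

-- ===== CLAIM (what is proved, stated in full; the proofs are below) =====
def Claim_equal_merge_replacements_py : Prop := ∀ (replacements : List (List (String × List String))) (patterns : List (String × Int)), Dom_merge_replacements_py replacements patterns → Spec_merge_replacements_py replacements patterns (merge_replacements_py replacements patterns)

-- ===== LEMMAS AND PROOFS =====

-- A's inner break-loop appends exactly the first matching pair, if any
theorem pvInnerA_eq (p : String) (r : List (String × List String)) :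
    ∀ acc, pvInnerA p r acc = acc ++ (r.find? (fun x => x.1 == p)).toList := by
  induction r with
  | nil => intro acc; simp [pvInnerA]
  | cons hd tl ih =>
    intro acc
    obtain ⟨k, l⟩ := hd
    by_cases h : (k == p) = true
    · simp [pvInnerA, beq_iff_eq.mp h]
    · simp [pvInnerA, h, ih]

-- lookup in the per-replacement "firsts" dict is the first match
theorem pvFirsts_get? (p : String) (r : List (String × List String)) :
    ∀ d : PySem.Dict String (String × List String),
      (r.foldl (fun d x => d.setdefault x.1 x) d).get? p
        = (d.get? p).or (r.find? (fun x => x.1 == p)) := by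
  induction r with
  | nil => intro d; simp
  | cons hd tl ih =>
    intro d
    simp only [List.foldl_cons]
    by_cases hc : d.contains hd.1 = true
    · rw [PySem.Dict.setdefault_of_contains _ _ hc, ih]
      by_cases hk : (hd.1 == p) = true
      · have : d.get? p ≠ none := by
          rw [beq_iff_eq.mp hk] at hc
          rw [PySem.Dict.contains_eq_isSome_get?] at hc
          intro h; rw [h] at hc; simp at hc
        obtain ⟨v, hv⟩ := Option.ne_none_iff_exists'.mp this
        simp [hv, hk]
      · simp [hk]
    · rw [PySem.Dict.setdefault_of_not_contains _ _ (by simpa using hc), ih]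
      by_cases hk : (hd.1 == p) = true
      · have hpe : hd.1 = p := beq_iff_eq.mp hk
        have hnone : d.get? p = none := by
          rw [← hpe]
          rw [PySem.Dict.contains_eq_isSome_get?] at hc
          cases h : d.get? hd.1 <;> simp [h] at hc ⊢
        subst hpe
        simp [PySem.Dict.get?_insert_self, hnone]
      · have hne : p ≠ hd.1 := fun h => hk (by simp [h])
        rw [PySem.Dict.get?_insert_of_ne _ _ hne]
        simp [hk]

-- the "firsts" dict keeps its keys distinct
theorem pvFirsts_nodup (r : List (String × List String)) :
    ∀ d : PySem.Dict String (String × List String), d.keys.Nodup →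
      (r.foldl (fun d x => d.setdefault x.1 x) d).keys.Nodup := by
  induction r with
  | nil => intro d h; simpa using h
  | cons hd tl ih =>
    intro d h
    simp only [List.foldl_cons]
    by_cases hc : d.contains hd.1 = true
    · rw [PySem.Dict.setdefault_of_contains _ _ hc]; exact ih d h
    · rw [PySem.Dict.setdefault_of_not_contains _ _ (by simpa using hc)]
      exact ih _ (PySem.Dict.nodup_keys_insert _ _ _ h)

-- items of a nodup-key dict filtered at key p = its lookup at p
theorem pvFilter_items {α : Type} (p : String) :
    ∀ l : List (String × α), (l.map Prod.fst).Nodup →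
      l.filter (fun x => x.1 == p) = ((PySem.Dict.mk l).get? p).toList.map (fun v => (p, v)) := by
  intro l
  induction l with
  | nil => intro _; simp [PySem.Dict.get?]
  | cons hd tl ih =>
    intro h
    obtain ⟨k, v⟩ := hd
    simp only [List.map_cons, List.nodup_cons] at h
    rw [List.filter_cons, PySem.Dict.get?_mk_cons]
    by_cases hk : (k == p) = true
    · have hpe : k = p := beq_iff_eq.mp hk
      have : tl.filter (fun x => x.1 == p) = [] := by
        rw [List.filter_eq_nil_iff]
        intro x hx hxk
        exact h.1 (by rw [hpe, ← beq_iff_eq.mp hxk]; exact List.mem_map_of_mem hx)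
      simp [this, hpe]
    · simp only [hk]
      exact ih h.2

-- the distilled per-replacement contribution
theorem pvFirsts_items (p : String) (r : List (String × List String)) :
    ((pvFirstsB r).items.filter (fun x => x.1 == p)).map (·.2)
      = (r.find? (fun x => x.1 == p)).toList := by
  have hnd : ((pvFirstsB r).items.map Prod.fst).Nodup := by
    have := pvFirsts_nodup r PySem.Dict.empty (by simp)
    simpa [PySem.Dict.keys] using this
  have hmk : PySem.Dict.mk (pvFirstsB r).items = pvFirstsB r := rfl
  rw [pvFilter_items p (pvFirstsB r).items hnd, hmk,
      pvFirstsB, pvFirsts_get? p r PySem.Dict.empty]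
  cases (r.find? (fun x => x.1 == p)) <;> simp

-- the grouping index holds, per key, the concatenation of first matches over replacements
theorem pvIndex_getD (p : String) (rs : List (List (String × List String))) :
    ∀ ix : PySem.Dict String (List (String × List String)),
      (rs.foldl (fun ix replacement =>
          (pvFirstsB replacement).items.foldl (fun ix x => ix.modify x.1 [] (· ++ [x.2])) ix) ix).getD p []
        = ix.getD p [] ++ rs.flatMap (fun r => (r.find? (fun x => x.1 == p)).toList) := by
  induction rs with
  | nil => intro ix; simp
  | cons hd tl ih =>
    intro ix
    simp only [List.foldl_cons, List.flatMap_cons]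
    rw [ih, PySem.Dict.getD_foldl_modify_append, pvFirsts_items, List.append_assoc]

theorem merge_replacements_py_spec : Claim_equal_merge_replacements_py := by
  unfold Claim_equal_merge_replacements_py
  intro replacements patterns _
  unfold Spec_merge_replacements_py merge_replacements_py merge_replacements_py_alt
  simp only []
  refine Prod.ext ?_ rfl
  apply PySem.List.foldl_congr_mem
  intro acc pr _
  have h1 := PySem.List.foldl_congr_mem replacements
      (fun acc replacement => pvInnerA pr.1 replacement acc)
      (fun acc r => acc ++ (r.find? (fun x => x.1 == pr.1)).toList) acc
      (fun acc r _ => pvInnerA_eq pr.1 r acc)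
  rw [h1, PySem.List.foldl_append_eq_flatMap,
      pvIndexB, pvIndex_getD pr.1 replacements PySem.Dict.empty]
  simp
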